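-- pv_equiv track=rewrite | github.com/fares-mldev/uns-cappy2023 | TP5/TP6.9.py | hay_mes_sin_cumple
-- ===== SOURCE A (Python) =====
-- def hay_mes_sin_cumple(fechas):
--     ret_val=[]
--     meses_con_cumple=[]
--     for fecha in fechas:
--         meses_con_cumple.append(fecha[1])
--     for mes in range(1,13):
--         if not (mes in meses_con_cumple):
--            return True
--     return False
-- ===== SOURCE B (Python) =====
-- def hay_mes_sin_cumple(fechas):
--     present = {f[1] for f in fechas if 1 <= f[1] <= 12}
--     return len(present) < 12
-- ===== Notes on version B (the rewrite author's own statement) =====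
-- stated objective: simpler
-- what changed: Replaces A's month list plus a 1..12 membership loop (12 linear scans with early return) by a one-pass set comprehension of in-range months and a single cardinality comparison against 12.
import Mathlib
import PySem

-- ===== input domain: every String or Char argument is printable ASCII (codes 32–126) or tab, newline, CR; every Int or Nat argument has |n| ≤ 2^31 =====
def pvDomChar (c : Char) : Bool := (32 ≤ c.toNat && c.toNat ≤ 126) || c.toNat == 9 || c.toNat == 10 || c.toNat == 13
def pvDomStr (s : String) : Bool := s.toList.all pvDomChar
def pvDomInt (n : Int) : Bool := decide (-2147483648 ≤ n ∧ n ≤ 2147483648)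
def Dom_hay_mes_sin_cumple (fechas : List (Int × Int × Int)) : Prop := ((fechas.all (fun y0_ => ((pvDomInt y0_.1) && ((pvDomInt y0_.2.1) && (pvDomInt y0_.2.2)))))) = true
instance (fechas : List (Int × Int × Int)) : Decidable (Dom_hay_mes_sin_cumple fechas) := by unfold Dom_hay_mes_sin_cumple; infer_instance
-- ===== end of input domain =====

-- B replaces A's month list and 1..12 membership loop by a one-pass set of in-range months
-- compared against the cardinality 12 (objective: simpler).

-- ===== PORT A =====
def hay_mes_sin_cumple (fechas : List (Int × Int × Int)) : Bool :=
  -- meses_con_cumple built by appending fecha[1] for each fecha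
  let meses_con_cumple : List Int := fechas.foldl (fun acc fecha => acc ++ [fecha.2.1]) []
  -- for mes in range(1,13): if mes not in meses_con_cumple: return True; return False
  (PySem.List.pyRange 1 13 1).any (fun mes => !(meses_con_cumple.contains mes))

-- ===== PORT B =====
def hay_mes_sin_cumple_alt (fechas : List (Int × Int × Int)) : Bool :=
  let present : PySem.Set Int :=
    PySem.Set.ofList (fechas.filterMap (fun f => if 1 ≤ f.2.1 ∧ f.2.1 ≤ 12 then some f.2.1 else none))
  decide (PySem.Set.len present < 12)

-- ===== PRECONDITION & SPEC =====
def Spec_hay_mes_sin_cumple (fechas : List (Int × Int × Int)) (out : Bool) : Prop := out = hay_mes_sin_cumple_alt fechas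
instance (fechas : List (Int × Int × Int)) (out : Bool) : Decidable (Spec_hay_mes_sin_cumple fechas out) := by unfold Spec_hay_mes_sin_cumple; infer_instance

-- ===== CLAIM (what is proved, stated in full; the proofs are below) =====
def Claim_equal_hay_mes_sin_cumple : Prop := ∀ (fechas : List (Int × Int × Int)), Dom_hay_mes_sin_cumple fechas → Spec_hay_mes_sin_cumple fechas (hay_mes_sin_cumple fechas)

-- ===== LEMMAS AND PROOFS =====

theorem foldl_append_snd (fechas : List (Int × Int × Int)) (acc : List Int) :
    fechas.foldl (fun acc fecha => acc ++ [fecha.2.1]) acc = acc ++ fechas.map (fun f => f.2.1) := by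
  induction fechas generalizing acc with
  | nil => simp
  | cons f t ih => simp [List.foldl, ih]

theorem filterMap_eq_filter (fechas : List (Int × Int × Int)) :
    fechas.filterMap (fun f => if 1 ≤ f.2.1 ∧ f.2.1 ≤ 12 then some f.2.1 else none)
      = (fechas.map (fun f => f.2.1)).filter (fun m => decide (1 ≤ m ∧ m ≤ 12)) := by
  induction fechas with
  | nil => rfl
  | cons f t ih => by_cases h : 1 ≤ f.2.1 ∧ f.2.1 ≤ 12 <;> simp [h, ih]

theorem core (ms : List Int) :
    (PySem.List.pyRange 1 13 1).any (fun mes => !(ms.contains mes))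
      = decide (((PySem.Set.ofList (ms.filter (fun m => decide (1 ≤ m ∧ m ≤ 12)))).length : Int) < 12) := by
  set S : List Int := PySem.Set.ofList (ms.filter (fun m => decide (1 ≤ m ∧ m ≤ 12))) with hS
  have hmemS : ∀ x : Int, x ∈ S ↔ (x ∈ ms ∧ 1 ≤ x ∧ x ≤ 12) := by
    intro x
    simp [hS, PySem.Set.mem_ofList, List.mem_filter]
  have hnodup : S.Nodup := PySem.Set.nodup_ofList _
  have hcard : S.toFinset.card = S.length := List.toFinset_card_of_nodup hnodup
  have hsub : S.toFinset ⊆ Finset.Icc (1 : Int) 12 := by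
    intro x hx
    rw [List.mem_toFinset] at hx
    rcases (hmemS x).1 hx with ⟨_, h1, h2⟩
    simp [Finset.mem_Icc, h1, h2]
  by_cases h : ∃ m : Int, 1 ≤ m ∧ m < 13 ∧ m ∉ ms
  · rcases h with ⟨m, hm1, hm2, hm3⟩
    have hlhs : (PySem.List.pyRange 1 13 1).any (fun mes => !(ms.contains mes)) = true := by
      rw [List.any_eq_true]
      exact ⟨m, by rw [PySem.List.mem_pyRange_one]; exact ⟨hm1, hm2⟩, by simpa using hm3⟩
    rw [hlhs]
    have hmS : m ∉ S.toFinset := by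
      rw [List.mem_toFinset, hmemS]
      exact fun hc => hm3 hc.1
    have hsub' : S.toFinset ⊆ (Finset.Icc (1 : Int) 12).erase m := by
      intro x hx
      exact Finset.mem_erase.2 ⟨fun he => hmS (he ▸ hx), hsub hx⟩
    have hle : S.toFinset.card ≤ ((Finset.Icc (1 : Int) 12).erase m).card :=
      Finset.card_le_card hsub'
    have hmIcc : m ∈ Finset.Icc (1 : Int) 12 := Finset.mem_Icc.2 ⟨hm1, by omega⟩
    have hE : ((Finset.Icc (1 : Int) 12).erase m).card = 11 := by
      rw [Finset.card_erase_of_mem hmIcc, Int.card_Icc]; rfl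
    symm
    rw [decide_eq_true_eq]
    omega
  · push Not at h
    have hlhs : (PySem.List.pyRange 1 13 1).any (fun mes => !(ms.contains mes)) = false := by
      rw [List.any_eq_false]
      intro m hm
      rw [PySem.List.mem_pyRange_one] at hm
      simp [h m hm.1 hm.2]
    rw [hlhs]
    have hsup : Finset.Icc (1 : Int) 12 ⊆ S.toFinset := by
      intro x hx
      rw [Finset.mem_Icc] at hx
      rw [List.mem_toFinset, hmemS]
      exact ⟨h x hx.1 (by omega), hx.1, hx.2⟩
    have hge : (Finset.Icc (1 : Int) 12).card ≤ S.toFinset.card := Finset.card_le_card hsup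
    rw [Int.card_Icc] at hge
    norm_num at hge
    symm
    rw [decide_eq_false_iff_not]
    omega

-- ===== VERDICT (by name: the statement is the Claim_ definition above) =====
theorem hay_mes_sin_cumple_spec : Claim_equal_hay_mes_sin_cumple := by
  intro fechas _
  unfold Spec_hay_mes_sin_cumple hay_mes_sin_cumple hay_mes_sin_cumple_alt
  simp only [foldl_append_snd, List.nil_append, filterMap_eq_filter, PySem.Set.len]
  exact_mod_cast core _
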